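-- pv_equiv track=rewrite | github.com/pulsence/local-second-mind | lsm/agents/assistants/email_assistant.py | _normalize_subject
-- ===== SOURCE A (Python) =====
-- def _normalize_subject(subject: str) -> str:
--     normalized = str(subject or "").strip()
--     lowered = normalized.lower()
--     for prefix in ("re:", "fwd:", "fw:"):
--         if lowered.startswith(prefix):
--             normalized = normalized[len(prefix) :].strip()
--             lowered = normalized.lower()
--     return normalized or "(no subject)"
-- ===== SOURCE B (Python) =====
-- def _cut(s: str, low: str, i: int, tokens: list) -> int:
--     """Return the index where the stripped subject really starts: recursive
--     descent over the ordered optional tokens, advancing a single cursor."""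
--     if not tokens:
--         return i
--     tok = tokens[0]
--     if low.startswith(tok, i):
--         i += len(tok)
--         while i < len(s) and s[i].isspace():
--             i += 1
--     return _cut(s, low, i, tokens[1:])
--
--
-- def _normalize_subject(subject: str) -> str:
--     s = str(subject or "").strip()
--     return s[_cut(s, s.lower(), 0, ["re:", "fwd:", "fw:"]):] or "(no subject)"
-- ===== Notes on version B (the rewrite author's own statement) =====
-- stated objective: alternative
-- what changed: Replaces A's loop that repeatedly slices the string, re-strips it and rebuilds a lowercased shadow copy with a recursive-descent matcher that advances a single cursor index over the original string and takes one final slice.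
import Mathlib
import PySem

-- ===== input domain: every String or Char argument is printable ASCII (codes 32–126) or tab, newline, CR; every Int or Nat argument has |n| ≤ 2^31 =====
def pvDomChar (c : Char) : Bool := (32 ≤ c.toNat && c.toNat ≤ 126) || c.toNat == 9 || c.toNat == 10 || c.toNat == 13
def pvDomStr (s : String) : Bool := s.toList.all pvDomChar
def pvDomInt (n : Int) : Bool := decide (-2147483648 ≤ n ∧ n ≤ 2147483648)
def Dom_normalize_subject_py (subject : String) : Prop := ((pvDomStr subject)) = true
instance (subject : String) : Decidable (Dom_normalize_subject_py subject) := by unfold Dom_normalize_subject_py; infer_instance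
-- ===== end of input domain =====

-- B replaces A's loop (which repeatedly slices, re-strips and re-lowers the string)
-- by a recursive-descent matcher advancing one cursor index, plus one final slice;
-- objective: alternative decomposition, same cost.

-- ===== PORT A =====
-- `normalized[len(prefix):]` has a nonnegative index, so the slice is exactly List.drop.
def normalize_subject_py (subject : String) : String :=
  let normalized := PySem.Chars.strip (if subject = "" then "" else subject).toList
  let st := [String.toList "re:", String.toList "fwd:", String.toList "fw:"].foldl
    (fun (st : List Char × List Char) (p : List Char) =>
      if PySem.Chars.startswith st.2 p then
        let n := PySem.Chars.strip (st.1.drop p.length)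
        (n, PySem.Chars.lower n)
      else st)
    (normalized, PySem.Chars.lower normalized)
  String.ofList (if st.1 = [] then "(no subject)".toList else st.1)

-- ===== PORT B =====
-- the `while i < len(s) and s[i].isspace(): i += 1` loop, ported step for step
def pvSkipWs (s : List Char) (i : Nat) : Nat :=
  if h : i < s.length then
    if PySem.Chars.isspace (s[i]'h) then pvSkipWs s (i + 1) else i
  else i
termination_by s.length - i

-- `low.startswith(tok, i)` with i ≥ 0 is startswith on the drop; `tokens[1:]` is the tail
def pvCutL (s low : List Char) (i : Nat) : List (List Char) → Nat
  | [] => i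
  | t :: ts =>
      pvCutL s low
        (if PySem.Chars.startswith (low.drop i) t then pvSkipWs s (i + t.length) else i) ts

def normalize_subject_py_alt (subject : String) : String :=
  let s := PySem.Chars.strip (if subject = "" then "" else subject).toList
  let r := s.drop (pvCutL s (PySem.Chars.lower s) 0
      [String.toList "re:", String.toList "fwd:", String.toList "fw:"])
  String.ofList (if r = [] then "(no subject)".toList else r)

-- ===== PRECONDITION & SPEC =====
def Spec_normalize_subject_py (subject : String) (out : String) : Prop := out = normalize_subject_py_alt subject
instance (subject : String) (out : String) : Decidable (Spec_normalize_subject_py subject out) := by unfold Spec_normalize_subject_py; infer_instance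

-- ===== CLAIM (what is proved, stated in full; the proofs are below) =====
def Claim_equal_normalize_subject_py : Prop := ∀ (subject : String), Dom_normalize_subject_py subject → Spec_normalize_subject_py subject (normalize_subject_py subject)

-- ===== LEMMAS AND PROOFS =====

-- a string with no trailing whitespace (all we need of cleanliness here)
def pvRclean (l : List Char) : Prop := PySem.Chars.rstrip l = l

theorem pvRstrip_of_suffix {l' l : List Char} (h : l' <:+ l)
    (hl : PySem.Chars.rstrip l = l) : PySem.Chars.rstrip l' = l' := by
  simp only [PySem.Chars.rstrip] at hl ⊢
  have hl2 : List.dropWhile PySem.Chars.isspace l.reverse = l.reverse := by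
    have := congrArg List.reverse hl
    simpa using this
  have hp : l'.reverse <+: l.reverse := List.reverse_prefix.mpr h
  rw [List.dropWhile_eq_self_iff] at hl2
  have : List.dropWhile PySem.Chars.isspace l'.reverse = l'.reverse := by
    rw [List.dropWhile_eq_self_iff]
    intro h0
    have h0' : 0 < l.reverse.length := lt_of_lt_of_le h0 hp.length_le
    have he : l'.reverse[0] = l.reverse[0] := hp.getElem h0
    rw [he]; exact hl2 h0'
  rw [this, List.reverse_reverse]

theorem pvRclean_strip (l : List Char) : pvRclean (PySem.Chars.strip l) := by
  simp only [pvRclean, PySem.Chars.strip, PySem.Chars.rstrip, List.reverse_reverse,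
    List.dropWhile_idempotent]

-- the while loop skips exactly the leading whitespace of the suffix
theorem pvSkipWs_drop (s : List Char) (i : Nat) :
    s.drop (pvSkipWs s i) = List.dropWhile PySem.Chars.isspace (s.drop i) := by
  unfold pvSkipWs
  split
  · rename_i hi
    have hd : s.drop i = s[i] :: s.drop (i + 1) := List.drop_eq_getElem_cons hi
    split
    · rename_i hsp
      rw [pvSkipWs_drop s (i + 1), hd, List.dropWhile_cons_of_pos hsp]
    · rename_i hsp
      rw [hd, List.dropWhile_cons_of_neg hsp]
  · rename_i hi
    rw [List.drop_eq_nil_of_le (le_of_not_gt hi), List.dropWhile_nil]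
termination_by s.length - i

-- strip of a suffix of an rstripped string is exactly the skip-whitespace drop
theorem pvStrip_drop {s : List Char} (hs : pvRclean s) (j : Nat) :
    PySem.Chars.strip (s.drop j) = s.drop (pvSkipWs s j) := by
  have hr : PySem.Chars.rstrip (List.dropWhile PySem.Chars.isspace (s.drop j)) = _ :=
    pvRstrip_of_suffix ((List.dropWhile_suffix _).trans (List.drop_suffix _ _)) hs
  simp only [PySem.Chars.strip, PySem.Chars.lstrip, hr, pvSkipWs_drop]

theorem pvLower_drop (s : List Char) (i : Nat) :
    PySem.Chars.lower (s.drop i) = (PySem.Chars.lower s).drop i := by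
  simp [PySem.Chars.lower, List.map_drop]

-- A's fold over the tokens, started at cursor i, lands at B's cursor pvCutL
theorem pvFold_cut {s : List Char} (hs : pvRclean s) (ts : List (List Char)) (i : Nat) :
    ts.foldl
      (fun (st : List Char × List Char) (p : List Char) =>
        if PySem.Chars.startswith st.2 p then
          let n := PySem.Chars.strip (st.1.drop p.length)
          (n, PySem.Chars.lower n)
        else st)
      (s.drop i, PySem.Chars.lower (s.drop i)) =
    (s.drop (pvCutL s (PySem.Chars.lower s) i ts),
     PySem.Chars.lower (s.drop (pvCutL s (PySem.Chars.lower s) i ts))) := by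
  induction ts generalizing i with
  | nil => rfl
  | cons t ts ih =>
    simp only [List.foldl_cons, pvCutL]
    rw [pvLower_drop]
    by_cases hc : PySem.Chars.startswith ((PySem.Chars.lower s).drop i) t = true
    · rw [if_pos hc, if_pos hc]
      have h1 : (s.drop i).drop t.length = s.drop (i + t.length) := by
        rw [List.drop_drop]
      rw [h1, pvStrip_drop hs, ← ih]
    · rw [if_neg hc, if_neg hc, ← ih, pvLower_drop]

-- ===== VERDICT (by name: the statement is the Claim_ definition above) =====
theorem normalize_subject_py_spec : Claim_equal_normalize_subject_py := by
  intro subject _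
  unfold Spec_normalize_subject_py normalize_subject_py normalize_subject_py_alt
  dsimp only
  have h := pvFold_cut (s := PySem.Chars.strip (if subject = "" then "" else subject).toList)
    (pvRclean_strip _) [String.toList "re:", String.toList "fwd:", String.toList "fw:"] 0
  simp only [List.drop_zero] at h
  rw [h]
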